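-- pv_equiv track=rewrite | github.com/GeburtstagsTorte/Homework | Homework Solution/Samuel/Euler Project/Euler18.py | generate_path_sum
-- ===== SOURCE A (Python) =====
-- def get_triangle_value(m, pos):
--     # gets the sum of every number which is possible to reach when you choose pos
--     count = m[pos[0]][pos[1]]
--     a = pos[1]+1
--     for i in range(pos[0]+1, len(m)):
--         a += 1
--         for j in m[i][pos[1]:a]:
--             count += j
--     return count
--
-- def generate_path_sum(m):
--     total = m[0][0]
--     current_pos = [0, 0]
--     l = [m[0][0]]
--     for i in range(1, len(m)):
--         choice0 = get_triangle_value(m, (i, current_pos[1]))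
--         choice1 = get_triangle_value(m, (i, current_pos[1] + 1))
--         if choice0 > choice1:
--             if i != len(m)-1:
--                 l.append(m[i][current_pos[1]])
--                 total += m[i][current_pos[1]]
--                 current_pos = (i, current_pos[1])
--             else:
--                 l.append(choice0)
--                 total += choice0
--
--         else:
--             if i != len(m)-1:
--                 l.append(m[i][current_pos[1] + 1])
--                 total += m[i][current_pos[1] + 1]
--                 current_pos = (i, current_pos[1] + 1)
--             else:
--                 l.append(choice1)
--                 total += choice1
--     return total, l
-- ===== SOURCE B (Python) =====
-- def generate_path_sum(m):
--     n = len(m)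
--     # T[i][j]: sum of all numbers reachable from (i, j); computed bottom-up in O(n^2)
--     # via D[i][j] = diagonal sum m[i][j] + m[i+1][j+1] + ... and T[i][j] = D[i][j] + T[i+1][j].
--     T = [None] * n
--     D = [None] * n
--     for i in range(n - 1, -1, -1):
--         Di = [0] * (i + 1)
--         Ti = [0] * (i + 1)
--         for j in range(i + 1):
--             d = m[i][j] + (D[i + 1][j + 1] if i + 1 < n else 0)
--             Di[j] = d
--             Ti[j] = d + (T[i + 1][j] if i + 1 < n else 0)
--         D[i] = Di
--         T[i] = Ti
--     total = m[0][0]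
--     l = [m[0][0]]
--     c = 0
--     for i in range(1, n):
--         nc = c if T[i][c] > T[i][c + 1] else c + 1
--         if i != n - 1:
--             l.append(m[i][nc])
--             total += m[i][nc]
--             c = nc
--         else:
--             l.append(T[i][nc])
--             total += T[i][nc]
--     return total, l
-- ===== Notes on version B (the rewrite author's own statement) =====
-- stated objective: faster
-- what changed: B replaces A's per-choice O(n^2) re-summation of each reachable subtriangle with one bottom-up O(n^2) dynamic-programming pass (diagonal sums D[i][j]=m[i][j]+D[i+1][j+1], subtriangle sums T[i][j]=D[i][j]+T[i+1][j]) so every greedy comparison is an O(1) table lookup.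
-- outside the precondition, e.g. on generate_path_sum([[1], [2, 3], [4, 5]]): A returns (8, [1, 2, 5]), B raises IndexError
import Mathlib
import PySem

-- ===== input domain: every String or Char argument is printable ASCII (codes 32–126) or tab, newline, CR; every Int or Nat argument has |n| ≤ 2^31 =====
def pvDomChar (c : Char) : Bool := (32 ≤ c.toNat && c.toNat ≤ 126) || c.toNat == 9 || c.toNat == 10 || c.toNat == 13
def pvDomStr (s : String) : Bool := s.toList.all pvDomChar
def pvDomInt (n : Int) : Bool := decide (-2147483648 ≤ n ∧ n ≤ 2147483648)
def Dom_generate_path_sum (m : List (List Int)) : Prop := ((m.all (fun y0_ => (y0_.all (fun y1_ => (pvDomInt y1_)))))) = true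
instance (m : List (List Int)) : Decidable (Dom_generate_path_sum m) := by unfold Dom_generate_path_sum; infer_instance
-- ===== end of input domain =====

-- B replaces A's per-choice re-summation of each reachable subtriangle by one bottom-up DP table
-- of subtriangle sums, so each greedy comparison is a table lookup (objective: faster).

-- ===== PORT A =====
def get_triangle_value (m : List (List Int)) (pos : Int × Int) : Int :=
  let count : Int := PySem.List.pyGetD (PySem.List.pyGetD m pos.1 []) pos.2 0
  let a : Int := pos.2 + 1
  let st := (PySem.List.pyRange (pos.1 + 1) (m.length : Int) 1).foldl
    (fun (st : Int × Int) i =>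
      let a := st.2 + 1
      let count := (PySem.List.slice (PySem.List.pyGetD m i []) (some pos.2) (some a)).foldl
        (fun x j => x + j) st.1
      (count, a)) (count, a)
  st.1

def generate_path_sum (m : List (List Int)) : Int × List Int :=
  let total : Int := PySem.List.pyGetD (PySem.List.pyGetD m 0 []) 0 0
  let current_pos : Int × Int := (0, 0)
  let l : List Int := [total]
  let st := (PySem.List.pyRange 1 (m.length : Int) 1).foldl
    (fun (st : Int × (Int × Int) × List Int) i =>
      if get_triangle_value m (i, st.2.1.2) > get_triangle_value m (i, st.2.1.2 + 1) then
        if i ≠ (m.length : Int) - 1 then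
          (st.1 + PySem.List.pyGetD (PySem.List.pyGetD m i []) st.2.1.2 0,
           (i, st.2.1.2),
           st.2.2 ++ [PySem.List.pyGetD (PySem.List.pyGetD m i []) st.2.1.2 0])
        else (st.1 + get_triangle_value m (i, st.2.1.2), st.2.1,
              st.2.2 ++ [get_triangle_value m (i, st.2.1.2)])
      else
        if i ≠ (m.length : Int) - 1 then
          (st.1 + PySem.List.pyGetD (PySem.List.pyGetD m i []) (st.2.1.2 + 1) 0,
           (i, st.2.1.2 + 1),
           st.2.2 ++ [PySem.List.pyGetD (PySem.List.pyGetD m i []) (st.2.1.2 + 1) 0])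
        else (st.1 + get_triangle_value m (i, st.2.1.2 + 1), st.2.1,
              st.2.2 ++ [get_triangle_value m (i, st.2.1.2 + 1)])) (total, current_pos, l)
  (st.1, st.2.2)

-- ===== PORT B =====
-- bottom-up DP table over the rows: for the suffix of rows starting at absolute row r, a list of
-- (D-row, T-row) pairs; D[i][j] = m[i][j] + D[i+1][j+1] and T[i][j] = D[i][j] + T[i+1][j]
def tdRows : List (List Int) → Nat → List (List Int × List Int)
  | [], _ => []
  | row :: rest, r =>
    let below := tdRows rest (r + 1)
    match below with
    | [] =>
      let dRow := (List.range (r + 1)).map (fun j => row.getD j 0)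
      [(dRow, dRow)]
    | (dN, tN) :: _ =>
      let dRow := (List.range (r + 1)).map (fun j => row.getD j 0 + dN.getD (j + 1) 0)
      let tRow := (List.range (r + 1)).map (fun j => dRow.getD j 0 + tN.getD j 0)
      (dRow, tRow) :: below

-- the greedy walk over (row of m, row of T) pairs from row 1 down; empty rest ⇔ last row
def walk : List (List Int × List Int) → Nat → Int → List Int → Int × List Int
  | [], _, total, l => (total, l)
  | (row, t) :: rest, c, total, l =>
    let nc := if t.getD c 0 > t.getD (c + 1) 0 then c else c + 1
    match rest with
    | [] => (total + t.getD nc 0, l ++ [t.getD nc 0])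
    | _ :: _ => walk rest nc (total + row.getD nc 0) (l ++ [row.getD nc 0])

def generate_path_sum_alt (m : List (List Int)) : Int × List Int :=
  let tR := (tdRows m 0).map (·.2)
  let first := (m.getD 0 []).getD 0 0
  walk ((m.zip tR).drop 1) 0 first [first]

-- ===== PRECONDITION & SPEC =====
-- Pre_ excludes the empty list and ragged inputs with some row i shorter than the i+1 entries the
-- triangle shape requires: there A usually raises IndexError, and B (which always builds the full
-- triangular table) raises on all of them, including the few where A's greedy path happens to
-- dodge the missing entries and A still returns a value.
def Pre_generate_path_sum (m : List (List Int)) : Prop :=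
  m ≠ [] ∧ ∀ i, i < m.length → i < (m.getD i []).length

instance (m : List (List Int)) : Decidable (Pre_generate_path_sum m) := by
  unfold Pre_generate_path_sum; infer_instance

def pvWitness_generate_path_sum : List (List Int) := [[3], [7, 4], [2, 4, 6]]

def Spec_generate_path_sum (m : List (List Int)) (out : Int × List Int) : Prop := out = generate_path_sum_alt m
instance (m : List (List Int)) (out : Int × List Int) : Decidable (Spec_generate_path_sum m out) := by unfold Spec_generate_path_sum; infer_instance

-- ===== CLAIM (what is proved, stated in full; the proofs are below) =====
def Claim_equal_generate_path_sum : Prop := ∀ (m : List (List Int)), Dom_generate_path_sum m → Pre_generate_path_sum m → Spec_generate_path_sum m (generate_path_sum m)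

-- ===== LEMMAS AND PROOFS =====

def triS : List (List Int) → Nat → Nat → Int
  | [], _, _ => 0
  | row :: rest, c, w => ((row.drop c).take w).sum + triS rest c (w + 1)
def diagS : List (List Int) → Nat → Int
  | [], _ => 0
  | row :: rest, c => row.getD c 0 + diagS rest (c + 1)
theorem sum_take_succ (l : List Int) (w : Nat) (h : w < l.length) :
    (l.take (w + 1)).sum = (l.take w).sum + l.getD w 0 := by
  rw [List.take_add_one, List.sum_append, List.getElem?_eq_getElem h]
  simp [List.getD, List.getElem?_eq_getElem h]
theorem triS_width (rows : List (List Int)) (c : Nat) :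
    ∀ w, (∀ k, k < rows.length → c + w + k < (rows.getD k []).length) →
    triS rows c (w + 1) = triS rows c w + diagS rows (c + w) := by
  induction rows with
  | nil => intro w _; simp [triS, diagS]
  | cons row rest ih =>
    intro w h
    have h0 : c + w < row.length := by simpa using h 0 (by simp)
    have hdw : w < (row.drop c).length := by simp; omega
    have hrec := ih (w + 1) (by
      intro k hk
      have h2 := h (k + 1) (Nat.succ_lt_succ hk)
      rw [List.getD_cons_succ] at h2
      omega)
    simp only [triS, diagS, hrec, sum_take_succ (row.drop c) w hdw]
    have : (row.drop c).getD w 0 = row.getD (c + w) 0 := by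
      simp [List.getD_eq_getElem?_getD, List.getElem?_drop]
    rw [this]
    have e1 : c + (w + 1) = c + w + 1 := rfl
    rw [e1]
    ring
theorem triS_cons_rec (row : List Int) (rest : List (List Int)) (c : Nat)
    (hc : c < row.length)
    (h : ∀ k, k < rest.length → c + 1 + k < (rest.getD k []).length) :
    triS (row :: rest) c 1 = (row.getD c 0 + diagS rest (c + 1)) + triS rest c 1 := by
  have h1 := triS_width rest c 1 h
  have ht : ((row.drop c).take 1).sum = row.getD c 0 := by
    have := sum_take_succ (row.drop c) 0 (by simp; omega)
    simpa [List.getD_eq_getElem?_getD, List.getElem?_drop] using this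
  simp only [triS, h1, ht]
  ring
def tdS : List (List Int) → Nat → List (List Int × List Int)
  | [], _ => []
  | row :: rest, r =>
    ((List.range (r + 1)).map (fun j => diagS (row :: rest) j),
     (List.range (r + 1)).map (fun j => triS (row :: rest) j 1)) :: tdS rest (r + 1)
theorem getD_map_range' (f : Nat → Int) (n k : Nat) (h : k < n) :
    ((List.range n).map f).getD k 0 = f k := by
  simp [List.getD_eq_getElem?_getD, h]
theorem tdS_drop (i : Nat) : ∀ (rows : List (List Int)) (r : Nat),
    (tdS rows r).drop i = tdS (rows.drop i) (r + i) := by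
  induction i with
  | zero => intro rows r; simp
  | succ n ih =>
    intro rows r
    cases rows with
    | nil => simp [tdS]
    | cons row rest =>
      have : (tdS (row :: rest) r).drop (n + 1) = (tdS rest (r + 1)).drop n := by
        simp [tdS]
      rw [this, ih rest (r + 1)]
      congr 1
      omega
theorem tdRows_eq (rows : List (List Int)) : ∀ r : Nat,
    (∀ k, k < rows.length → r + k < (rows.getD k []).length) →
    tdRows rows r = tdS rows r := by
  induction rows with
  | nil => intro r _; rfl
  | cons row rest ih =>
    intro r h
    have hrow : r < row.length := by simpa using h 0 (by simp)
    have hrest : ∀ k, k < rest.length → (r + 1) + k < (rest.getD k []).length := by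
      intro k hk
      have h2 := h (k + 1) (Nat.succ_lt_succ hk)
      rw [List.getD_cons_succ] at h2
      omega
    have hb : tdRows rest (r + 1) = tdS rest (r + 1) := ih (r + 1) hrest
    rw [tdRows.eq_def]
    dsimp only
    rw [hb]
    cases rest with
    | nil =>
      dsimp only [tdS]
      simp only [List.cons.injEq, Prod.mk.injEq, and_true]
      refine ⟨?_, ?_⟩
      · apply List.map_congr_left
        intro j hj
        have hj' : j < r + 1 := List.mem_range.mp hj
        simp [diagS]
      · apply List.map_congr_left
        intro j hj
        have hj' : j < r + 1 := List.mem_range.mp hj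
        have hjr : j < row.length := by omega
        simp only [triS]
        have := sum_take_succ (row.drop j) 0 (by simp; omega)
        simp at this
        simp [this, List.getD_eq_getElem?_getD]
    | cons row2 rest2 =>
      have hbs : tdS (row2 :: rest2) (r + 1) =
          ((List.range (r + 2)).map (fun j => diagS (row2 :: rest2) j),
           (List.range (r + 2)).map (fun j => triS (row2 :: rest2) j 1)) :: tdS rest2 (r + 2) := rfl
      rw [hbs]
      dsimp only
      conv_rhs => rw [tdS]
      rw [← hbs]
      simp only [List.cons.injEq, Prod.mk.injEq]
      refine ⟨⟨?_, ?_⟩, trivial⟩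
      · apply List.map_congr_left
        intro j hj
        have hj' : j < r + 1 := List.mem_range.mp hj
        rw [getD_map_range' _ _ _ (by omega)]
        simp [diagS]
      · apply List.map_congr_left
        intro j hj
        have hj' : j < r + 1 := List.mem_range.mp hj
        rw [getD_map_range' _ _ _ (by omega), getD_map_range' _ _ _ (by omega)]
        have hc : j < row.length := by omega
        have hr2 : ∀ k, k < (row2 :: rest2).length → j + 1 + k < ((row2 :: rest2).getD k []).length := by
          intro k hk
          have := hrest k hk
          omega
        rw [triS_cons_rec row (row2 :: rest2) j hc hr2,
            getD_map_range' _ _ _ (show j < r + 2 by omega)]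
theorem fold_triS (m : List (List Int)) (c : Nat) :
    ∀ p, p ≤ m.length → ∀ (w : Nat) (cnt : Int),
    ((PySem.List.pyRange ((p : Nat) : Int) ((m.length : Nat) : Int) 1).foldl
      (fun (st : Int × Int) i =>
        ((PySem.List.slice (PySem.List.pyGetD m i []) (some ((c : Nat) : Int)) (some (st.2 + 1))).foldl
          (fun x j => x + j) st.1, st.2 + 1)) (cnt, ((c : Nat) : Int) + ((w : Nat) : Int))).1
    = cnt + triS (m.drop p) c (w + 1) := by
  intro p hp
  induction hd : m.length - p generalizing p with
  | zero =>
    intro w cnt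
    have hpe : p = m.length := by omega
    subst hpe
    rw [PySem.List.pyRange_one_eq_nil (by omega)]
    simp [triS]
  | succ d ihd =>
    intro w cnt
    have hplt : p < m.length := by omega
    rw [PySem.List.pyRange_one_cons (by exact_mod_cast hplt)]
    simp only [List.foldl_cons]
    have hdrop : m.drop p = m[p] :: m.drop (p + 1) := List.drop_eq_getElem_cons hplt
    have hget : PySem.List.pyGetD m ((p : Nat) : Int) [] = m[p] := by
      simp [PySem.List.pyGetD_natCast, List.getD_eq_getElem?_getD, hplt]
    have hc1 : ((c : Nat) : Int) + ((w : Nat) : Int) + 1 = (((c + w + 1 : Nat)) : Int) := by push_cast; ring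
    have hslice : PySem.List.slice m[p] (some ((c : Nat) : Int)) (some (((c + w + 1 : Nat)) : Int))
        = (m[p].drop c).take (w + 1) := by
      rw [PySem.List.slice_natCast]
      congr 1
      omega
    have hc2 : (((c + w + 1 : Nat)) : Int) = ((c : Nat) : Int) + (((w + 1 : Nat)) : Int) := by
      push_cast; ring
    have hp1 : ((p : Nat) : Int) + 1 = (((p + 1 : Nat)) : Int) := by push_cast; ring
    rw [hget]
    rw [hc1, hslice, PySem.List.foldl_add, hc2, hp1,
        ihd (p + 1) (by omega) (by omega) (w + 1)]
    rw [hdrop]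
    simp only [triS, List.map_id_fun', id]
    ring
theorem gtv_eq (m : List (List Int)) (r c : Nat) (hr : r < m.length)
    (hc : c < (m.getD r []).length) :
    get_triangle_value m (((r : Nat) : Int), ((c : Nat) : Int)) = triS (m.drop r) c 1 := by
  unfold get_triangle_value
  dsimp only
  have hget : PySem.List.pyGetD m ((r : Nat) : Int) [] = m.getD r [] := by
    simp [PySem.List.pyGetD_natCast]
  have hr1 : ((r : Nat) : Int) + 1 = (((r + 1 : Nat)) : Int) := by push_cast; ring
  have hcw : ((c : Nat) : Int) + 1 = ((c : Nat) : Int) + (((1 : Nat)) : Int) := by push_cast; ring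
  have hget2 : PySem.List.pyGetD (m.getD r []) ((c : Nat) : Int) 0 = (m.getD r []).getD c 0 := by
    simp [PySem.List.pyGetD_natCast]
  rw [hget, hget2, hr1, hcw, fold_triS m c (r + 1) (by omega) 1 ((m.getD r []).getD c 0)]
  have hdrop : m.drop r = (m.getD r []) :: m.drop (r + 1) := by
    rw [List.drop_eq_getElem_cons hr, List.getD_eq_getElem m [] hr]
  rw [hdrop]
  simp only [triS]
  have ht : (((m.getD r []).drop c).take 1).sum = (m.getD r []).getD c 0 := by
    have h0 : (0 : Nat) < ((m.getD r []).drop c).length := by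
      rw [List.length_drop]; omega
    have := sum_take_succ ((m.getD r []).drop c) 0 h0
    simpa [List.getD_eq_getElem?_getD, List.getElem?_drop] using this
  rw [ht]
theorem zip_drop' {α β : Type} : ∀ (n : Nat) (l : List α) (l2 : List β),
    (l.zip l2).drop n = (l.drop n).zip (l2.drop n) := by
  intro n
  induction n with
  | zero => intro l l2; simp
  | succ k ih =>
    intro l l2
    cases l with
    | nil => simp
    | cons a l =>
      cases l2 with
      | nil => simp
      | cons b l2 => simp [ih l l2]
theorem map_drop' {α β : Type} (f : α → β) : ∀ (n : Nat) (l : List α),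
    (l.map f).drop n = (l.drop n).map f := by
  intro n
  induction n with
  | zero => intro l; simp
  | succ k ih =>
    intro l
    cases l with
    | nil => simp
    | cons a l => simpa using ih l
theorem walk_last (row t : List Int) (c : Nat) (total : Int) (l : List Int) :
    walk [(row, t)] c total l =
      (total + t.getD (if t.getD c 0 > t.getD (c + 1) 0 then c else c + 1) 0,
       l ++ [t.getD (if t.getD c 0 > t.getD (c + 1) 0 then c else c + 1) 0]) := rfl
theorem walk_cons (row t : List Int) (p : List Int × List Int) (rest : List (List Int × List Int))
    (c : Nat) (total : Int) (l : List Int) :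
    walk ((row, t) :: p :: rest) c total l =
      walk (p :: rest) (if t.getD c 0 > t.getD (c + 1) 0 then c else c + 1)
        (total + row.getD (if t.getD c 0 > t.getD (c + 1) 0 then c else c + 1) 0)
        (l ++ [row.getD (if t.getD c 0 > t.getD (c + 1) 0 then c else c + 1) 0]) := rfl
theorem zl_drop (m : List (List Int)) (i : Nat) :
    ((m.zip ((tdS m 0).map (·.2))).drop i) = (m.drop i).zip ((tdS (m.drop i) i).map (·.2)) := by
  rw [zip_drop', map_drop']
  congr 2
  have := tdS_drop i m 0
  simpa using this
theorem loop_eq (m : List (List Int))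
    (hlen : ∀ i, i < m.length → i < (m.getD i []).length) :
    ∀ i, 1 ≤ i → i ≤ m.length → ∀ (c : Nat), c < i → ∀ (x total : Int) (l : List Int),
    (((PySem.List.pyRange ((i : Nat) : Int) (m.length : Int) 1).foldl
      (fun (st : Int × (Int × Int) × List Int) i =>
        if get_triangle_value m (i, st.2.1.2) > get_triangle_value m (i, st.2.1.2 + 1) then
          if i ≠ (m.length : Int) - 1 then
            (st.1 + PySem.List.pyGetD (PySem.List.pyGetD m i []) st.2.1.2 0,
             (i, st.2.1.2),
             st.2.2 ++ [PySem.List.pyGetD (PySem.List.pyGetD m i []) st.2.1.2 0])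
          else (st.1 + get_triangle_value m (i, st.2.1.2), st.2.1,
                st.2.2 ++ [get_triangle_value m (i, st.2.1.2)])
        else
          if i ≠ (m.length : Int) - 1 then
            (st.1 + PySem.List.pyGetD (PySem.List.pyGetD m i []) (st.2.1.2 + 1) 0,
             (i, st.2.1.2 + 1),
             st.2.2 ++ [PySem.List.pyGetD (PySem.List.pyGetD m i []) (st.2.1.2 + 1) 0])
          else (st.1 + get_triangle_value m (i, st.2.1.2 + 1), st.2.1,
                st.2.2 ++ [get_triangle_value m (i, st.2.1.2 + 1)])) (total, (x, ((c : Nat) : Int)), l)).1,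
     ((PySem.List.pyRange ((i : Nat) : Int) (m.length : Int) 1).foldl
      (fun (st : Int × (Int × Int) × List Int) i =>
        if get_triangle_value m (i, st.2.1.2) > get_triangle_value m (i, st.2.1.2 + 1) then
          if i ≠ (m.length : Int) - 1 then
            (st.1 + PySem.List.pyGetD (PySem.List.pyGetD m i []) st.2.1.2 0,
             (i, st.2.1.2),
             st.2.2 ++ [PySem.List.pyGetD (PySem.List.pyGetD m i []) st.2.1.2 0])
          else (st.1 + get_triangle_value m (i, st.2.1.2), st.2.1,
                st.2.2 ++ [get_triangle_value m (i, st.2.1.2)])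
        else
          if i ≠ (m.length : Int) - 1 then
            (st.1 + PySem.List.pyGetD (PySem.List.pyGetD m i []) (st.2.1.2 + 1) 0,
             (i, st.2.1.2 + 1),
             st.2.2 ++ [PySem.List.pyGetD (PySem.List.pyGetD m i []) (st.2.1.2 + 1) 0])
          else (st.1 + get_triangle_value m (i, st.2.1.2 + 1), st.2.1,
                st.2.2 ++ [get_triangle_value m (i, st.2.1.2 + 1)])) (total, (x, ((c : Nat) : Int)), l)).2.2)
    = walk ((m.zip ((tdS m 0).map (·.2))).drop i) c total l := by
  intro i
  induction hd : m.length - i generalizing i with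
  | zero =>
    intro h1 hin c hc x total l
    have hie : i = m.length := by omega
    rw [PySem.List.pyRange_one_eq_nil (by omega), zl_drop]
    subst hie
    simp [walk]
  | succ d ihd =>
    intro h1 hin c hc x total l
    have hilt : i < m.length := by omega
    rw [PySem.List.pyRange_one_cons (by exact_mod_cast hilt), zl_drop]
    simp only [List.foldl_cons]
    have hrowlen : i < (m.getD i []).length := hlen i hilt
    have hdropm : m.drop i = m.getD i [] :: m.drop (i + 1) := by
      rw [List.drop_eq_getElem_cons hilt, List.getD_eq_getElem m [] hilt]
    have htd : tdS (m.drop i) i =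
        ((List.range (i + 1)).map (fun j => diagS (m.drop i) j),
         (List.range (i + 1)).map (fun j => triS (m.drop i) j 1)) :: tdS (m.drop (i + 1)) (i + 1) := by
      conv_lhs => rw [hdropm]
      rw [tdS]
      rw [← hdropm]
    have hzip : (m.drop i).zip ((tdS (m.drop i) i).map (·.2)) =
        ((m.getD i []), (List.range (i + 1)).map (fun j => triS (m.drop i) j 1)) ::
          ((m.drop (i + 1)).zip ((tdS (m.drop (i + 1)) (i + 1)).map (·.2))) := by
      rw [htd]
      simp only [List.map_cons]
      conv_lhs => rw [hdropm]
      rw [List.zip_cons_cons, ← hdropm]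
    rw [hzip]
    have hc1 : ((c : Nat) : Int) + 1 = (((c + 1 : Nat)) : Int) := by push_cast; ring
    have hgtv0 : get_triangle_value m (((i : Nat) : Int), ((c : Nat) : Int)) = triS (m.drop i) c 1 :=
      gtv_eq m i c hilt (by omega)
    have hgtv1 : get_triangle_value m (((i : Nat) : Int), (((c + 1 : Nat)) : Int)) = triS (m.drop i) (c + 1) 1 :=
      gtv_eq m i (c + 1) hilt (by omega)
    rw [hc1, hgtv0, hgtv1]
    have hgetm : PySem.List.pyGetD m ((i : Nat) : Int) [] = m.getD i [] := by
      simp [PySem.List.pyGetD_natCast]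
    have hgetc : PySem.List.pyGetD (m.getD i []) ((c : Nat) : Int) 0 = (m.getD i []).getD c 0 := by
      rw [PySem.List.pyGetD_natCast]
    have hgetc1 : PySem.List.pyGetD (m.getD i []) (((c + 1 : Nat)) : Int) 0 = (m.getD i []).getD (c + 1) 0 := by
      rw [PySem.List.pyGetD_natCast]
    rw [hgetm, hgetc, hgetc1]
    have htgc : ((List.range (i + 1)).map (fun j => triS (m.drop i) j 1)).getD c 0 = triS (m.drop i) c 1 :=
      getD_map_range' _ _ _ (by omega)
    have htgc1 : ((List.range (i + 1)).map (fun j => triS (m.drop i) j 1)).getD (c + 1) 0 = triS (m.drop i) (c + 1) 1 :=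
      getD_map_range' _ _ _ (by omega)
    by_cases hlast : i + 1 = m.length
    · have hrest : m.drop (i + 1) = ([] : List (List Int)) := by
        apply List.drop_eq_nil_of_le
        omega
      rw [hrest]
      simp only [List.zip_nil_left]
      rw [walk_last, htgc, htgc1]
      have hcond : ¬ ((i : Int) ≠ (m.length : Int) - 1) := by omega
      rw [if_neg hcond, if_neg hcond]
      rw [show ((i : Nat) : Int) + 1 = ((m.length : Nat) : Int) by omega]
      rw [PySem.List.pyRange_one_eq_nil (by omega)]
      by_cases hch : triS (m.drop i) c 1 > triS (m.drop i) (c + 1) 1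
      · simp only [if_pos hch, List.foldl_nil, htgc]
      · simp only [if_neg hch, List.foldl_nil, htgc1]
    · have hrest : m.drop (i + 1) = (m.getD (i + 1) []) :: m.drop (i + 2) := by
        rw [List.drop_eq_getElem_cons (by omega), List.getD_eq_getElem m [] (by omega)]
      have hzip1 : (m.drop (i + 1)).zip ((tdS (m.drop (i + 1)) (i + 1)).map (·.2)) =
          ((m.getD (i + 1) []), ((List.range (i + 2)).map (fun j => triS (m.drop (i + 1)) j 1))) ::
            ((m.drop (i + 2)).zip ((tdS (m.drop (i + 2)) (i + 2)).map (·.2))) := by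
        have htd1 : tdS (m.drop (i + 1)) (i + 1) =
            ((List.range (i + 2)).map (fun j => diagS (m.drop (i + 1)) j),
             (List.range (i + 2)).map (fun j => triS (m.drop (i + 1)) j 1)) :: tdS (m.drop (i + 2)) (i + 2) := by
          conv_lhs => rw [hrest]
          rw [tdS]
          rw [← hrest]
        rw [htd1]
        simp only [List.map_cons]
        conv_lhs => rw [hrest]
        rw [List.zip_cons_cons, ← hrest]
      have hcond : ((i : Nat) : Int) ≠ (m.length : Int) - 1 := by omega
      rw [if_pos hcond, if_pos hcond]
      have hp1 : ((i : Nat) : Int) + 1 = (((i + 1 : Nat)) : Int) := by push_cast; ring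
      rw [hzip1]
      by_cases hch : triS (m.drop i) c 1 > triS (m.drop i) (c + 1) 1
      · simp only [if_pos hch]
        rw [hp1,
            ihd (i + 1) (by omega) (by omega) (by omega) c (by omega) ((i : Nat) : Int)
              (total + (m.getD i []).getD c 0) (l ++ [(m.getD i []).getD c 0]),
            zl_drop m (i + 1), hzip1]
        conv_rhs => rw [walk_cons]
        rw [htgc, htgc1]
        simp only [if_pos hch]
      · simp only [if_neg hch]
        rw [hp1,
            ihd (i + 1) (by omega) (by omega) (by omega) (c + 1) (by omega) ((i : Nat) : Int)
              (total + (m.getD i []).getD (c + 1) 0) (l ++ [(m.getD i []).getD (c + 1) 0]),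
            zl_drop m (i + 1), hzip1]
        conv_rhs => rw [walk_cons]
        rw [htgc, htgc1]
        simp only [if_neg hch]

-- ===== VERDICT (by name: the statement is the Claim_ definition above) =====
theorem generate_path_sum_spec : Claim_equal_generate_path_sum := by
  intro m _ hpre
  obtain ⟨hne, hlen⟩ := hpre
  have hn : 0 < m.length := by
    cases m with
    | nil => exact absurd rfl hne
    | cons a l => simp
  unfold Spec_generate_path_sum generate_path_sum generate_path_sum_alt
  dsimp only
  rw [tdRows_eq m 0 (by intro k hk; have := hlen k hk; omega)]
  rw [PySem.List.pyGetD_zero, PySem.List.pyGetD_zero]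
  have h := loop_eq m hlen 1 (by omega) (by omega) 0 (by omega) 0
    ((m.getD 0 []).getD 0 0) [(m.getD 0 []).getD 0 0]
  simp only [Nat.cast_one, Nat.cast_zero] at h
  exact h
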